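-- pv_equiv track=rewrite | github.com/pauel3312/AoC_2023 | Day_13/Day_13_part_2.py | lines_near_equal
-- ===== SOURCE A (Python) =====
-- def lines_near_equal(line1, line2):
--     if len(line1) != len(line2):
--         raise Exception("Lengths do not match")
--     error_found = False
--     for i in range(len(line1)):
--         if line1[i] != line2[i]:
--             if error_found:
--                 return False, False
--             error_found = True
--     return True, error_found
-- ===== SOURCE B (Python) =====
-- def lines_near_equal(line1, line2):
--     if len(line1) != len(line2):
--         raise Exception("Lengths do not match")
--     if line1 == line2:
--         return True, False
--     k = next(i for i in range(len(line1)) if line1[i] != line2[i])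
--     tails_equal = line1[k + 1:] == line2[k + 1:]
--     return tails_equal, tails_equal
-- ===== Notes on version B (the rewrite author's own statement) =====
-- stated objective: alternative
-- what changed: Replaces A's character-by-character loop with a maintained flag by three staged whole-string comparisons: full equality check, then locating the first mismatch, then a single suffix equality comparison that decides both booleans.
import Mathlib
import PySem

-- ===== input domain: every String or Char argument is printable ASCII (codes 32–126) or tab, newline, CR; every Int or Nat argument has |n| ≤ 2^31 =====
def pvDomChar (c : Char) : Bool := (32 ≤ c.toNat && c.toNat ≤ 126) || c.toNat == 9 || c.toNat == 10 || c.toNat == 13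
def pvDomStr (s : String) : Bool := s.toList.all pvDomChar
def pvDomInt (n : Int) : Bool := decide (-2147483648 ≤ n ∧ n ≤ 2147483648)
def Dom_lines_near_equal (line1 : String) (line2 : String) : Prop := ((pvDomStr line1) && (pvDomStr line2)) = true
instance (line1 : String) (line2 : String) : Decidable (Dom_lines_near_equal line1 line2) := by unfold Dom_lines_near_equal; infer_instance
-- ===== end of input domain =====

-- B replaces A's flag-carrying loop by staged whole-string comparisons: equality check,
-- first-mismatch position, then one suffix comparison (alternative decomposition, same cost).
-- Both Pythons raise on unequal lengths; Pre_ excludes exactly those inputs.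

-- ===== PORT A =====
-- A's loop: walks the characters in step, carrying the error_found flag, returning early on a second mismatch.
def linesNearEqualLoopA : List Char → List Char → Bool → Bool × Bool
  | c1 :: t1, c2 :: t2, errorFound =>
      if c1 ≠ c2 then
        if errorFound then (false, false)
        else linesNearEqualLoopA t1 t2 true
      else linesNearEqualLoopA t1 t2 errorFound
  | _, _, errorFound => (true, errorFound)

def lines_near_equal (line1 : String) (line2 : String) : Bool × Bool :=
  linesNearEqualLoopA line1.toList line2.toList false

-- ===== PORT B =====
-- index of the first mismatching position (B's 'next(i for i in range(...) if ...)')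
def firstMismatchB : List Char → List Char → Nat
  | c1 :: t1, c2 :: t2 => if c1 ≠ c2 then 0 else firstMismatchB t1 t2 + 1
  | _, _ => 0

def lines_near_equal_alt (line1 : String) (line2 : String) : Bool × Bool :=
  let l1 := line1.toList
  let l2 := line2.toList
  if l1 = l2 then (true, false)
  else
    let k := firstMismatchB l1 l2
    let tailsEqual := decide (l1.drop (k + 1) = l2.drop (k + 1))
    (tailsEqual, tailsEqual)

-- ===== PRECONDITION & SPEC =====
-- A raises Exception("Lengths do not match") when lengths differ; Pre_ admits equal-length pairs.
def Pre_lines_near_equal (line1 : String) (line2 : String) : Prop :=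
  line1.length = line2.length
instance (line1 : String) (line2 : String) : Decidable (Pre_lines_near_equal line1 line2) := by
  unfold Pre_lines_near_equal; infer_instance

def pvWitness_lines_near_equal : String × String := ("ab#", "ab!")

def Spec_lines_near_equal (line1 : String) (line2 : String) (out : Bool × Bool) : Prop := out = lines_near_equal_alt line1 line2
instance (line1 : String) (line2 : String) (out : Bool × Bool) : Decidable (Spec_lines_near_equal line1 line2 out) := by unfold Spec_lines_near_equal; infer_instance

-- ===== CLAIM (what is proved, stated in full; the proofs are below) =====
def Claim_equal_lines_near_equal : Prop := ∀ (line1 : String) (line2 : String), Dom_lines_near_equal line1 line2 → Pre_lines_near_equal line1 line2 → Spec_lines_near_equal line1 line2 (lines_near_equal line1 line2)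

-- ===== LEMMAS AND PROOFS =====
-- A's loop with the flag already set just checks the remaining lists for equality.
theorem loopA_true_eq (l1 l2 : List Char) (h : l1.length = l2.length) :
    linesNearEqualLoopA l1 l2 true = (decide (l1 = l2), decide (l1 = l2)) := by
  induction l1 generalizing l2 with
  | nil => cases l2 with
    | nil => simp [linesNearEqualLoopA]
    | cons _ _ => simp at h
  | cons c1 t1 ih =>
    cases l2 with
    | nil => simp at h
    | cons c2 t2 =>
      simp at h
      by_cases hc : c1 = c2
      · simp [linesNearEqualLoopA, hc, ih t2 h]
      · simp [linesNearEqualLoopA, hc]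

-- core equivalence on equal-length lists
theorem loopA_eq_altCore (l1 l2 : List Char) (h : l1.length = l2.length) :
    linesNearEqualLoopA l1 l2 false =
      (if l1 = l2 then (true, false)
       else
         let k := firstMismatchB l1 l2
         let t := decide (l1.drop (k + 1) = l2.drop (k + 1))
         (t, t)) := by
  induction l1 generalizing l2 with
  | nil => cases l2 with
    | nil => simp [linesNearEqualLoopA]
    | cons _ _ => simp at h
  | cons c1 t1 ih =>
    cases l2 with
    | nil => simp at h
    | cons c2 t2 =>
      simp at h
      by_cases hc : c1 = c2
      · subst hc
        simp only [linesNearEqualLoopA, ne_eq, not_true_eq_false, if_false]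
        rw [ih t2 h]
        by_cases ht : t1 = t2
        · simp [ht]
        · simp [ht, firstMismatchB, List.drop]
      · simp [linesNearEqualLoopA, hc, loopA_true_eq t1 t2 h, firstMismatchB]

-- ===== VERDICT (by name: the statement is the Claim_ definition above) =====
theorem lines_near_equal_spec : Claim_equal_lines_near_equal := by
  intro line1 line2 _ hpre
  unfold Spec_lines_near_equal lines_near_equal lines_near_equal_alt
  have h : line1.toList.length = line2.toList.length := by
    rw [String.length_toList, String.length_toList]; exact hpre
  rw [loopA_eq_altCore _ _ h]
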